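-- pv_equiv track=rewrite | github.com/mkleyman/protein_alignment | code/parser.py | reference_to_comparison_listmap
-- ===== SOURCE A (Python) =====
-- def reference_to_comparison_listmap(ref_dict, comparison_dict, ref_protien_list,
--                                     comparison_protien_set):
--     '''
--
--     :param ref_dict: dictionary mapping reference protein to homolog id
--     :param comparison_dict: dictionary mapping homolog ids to comparison protein
--     :param ref_protien_list: list of relevant proteins from the reference
--     :param comparison_protien_set: set of relevant proteins from the comparison
--     :return: homolog dict: dictionary mapping reference protien to list of comaprison
--     homolog, homologs, set of comparison homologs
--     '''
--     homolog_dict = {}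
--     homologs = set()
--     for ref_protein in ref_protien_list:
--         if ref_protein in ref_dict:
--             homolog = ref_dict[ref_protein]
--             if homolog in comparison_dict:
--                 comp_protein = comparison_dict[homolog]
--                 if comp_protein in comparison_protien_set:
--                     homologs.add(comp_protein)
--                     if ref_protein in homolog_dict:
--                         homolog_dict[ref_protein].append(comp_protein)
--                     else: homolog_dict[ref_protein] = [comp_protein]
--     return homolog_dict, homologs
-- ===== SOURCE B (Python) =====
-- def reference_to_comparison_listmap(ref_dict, comparison_dict, ref_protien_list,
--                                     comparison_protien_set):
--     # Precompute the relational join of the two dicts once: reference protein ->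
--     # its accepted comparison homolog (present in comparison_protien_set).
--     comp_map = {}
--     for r, h in ref_dict.items():
--         if h in comparison_dict:
--             c = comparison_dict[h]
--             if c in comparison_protien_set:
--                 comp_map[r] = c
--     # Count, in first-seen order, how often each joinable reference protein occurs.
--     counts = {}
--     for r in ref_protien_list:
--         if r in comp_map:
--             counts[r] = counts.get(r, 0) + 1
--     # Each value list is n repetitions of the single joined homolog.
--     homolog_dict = {r: [comp_map[r]] * n for r, n in counts.items()}
--     homologs = set(comp_map[r] for r in counts)
--     return homolog_dict, homologs
-- ===== Notes on version B (the rewrite author's own statement) =====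
-- stated objective: alternative
-- what changed: B replaces A's per-element chained lookups with append-or-create lists by a staged join-and-count algorithm: it first materialises the composition of the two dicts (reference protein -> accepted comparison homolog) as one join dict built from ref_dict.items(), then counts occurrences of joinable reference proteins in the list, and finally builds each value list by replicating the single joined homolog count times and the homolog set from the join values of the counted keys.
import Mathlib
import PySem

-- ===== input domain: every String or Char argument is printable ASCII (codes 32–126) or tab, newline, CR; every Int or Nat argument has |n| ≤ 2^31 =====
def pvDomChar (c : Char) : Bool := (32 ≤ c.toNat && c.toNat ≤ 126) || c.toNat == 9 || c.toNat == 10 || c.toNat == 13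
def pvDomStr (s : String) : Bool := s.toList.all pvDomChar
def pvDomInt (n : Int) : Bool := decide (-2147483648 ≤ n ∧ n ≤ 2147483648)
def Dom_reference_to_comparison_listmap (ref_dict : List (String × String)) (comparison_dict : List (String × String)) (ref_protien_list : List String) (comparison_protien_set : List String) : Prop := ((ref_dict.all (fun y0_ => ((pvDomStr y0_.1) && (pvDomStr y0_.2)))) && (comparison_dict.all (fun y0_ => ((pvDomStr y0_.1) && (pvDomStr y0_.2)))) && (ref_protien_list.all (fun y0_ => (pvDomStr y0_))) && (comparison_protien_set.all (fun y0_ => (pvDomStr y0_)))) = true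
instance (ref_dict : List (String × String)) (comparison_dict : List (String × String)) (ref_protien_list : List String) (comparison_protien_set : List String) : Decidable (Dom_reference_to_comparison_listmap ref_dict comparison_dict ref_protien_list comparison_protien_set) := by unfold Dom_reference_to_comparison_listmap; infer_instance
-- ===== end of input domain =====

-- B replaces A's per-element chained lookups with append-or-create by a staged algorithm:
-- join the two dicts once, count joinable list occurrences, then replicate (alternative, same cost).

-- ===== PORT A =====
-- A's loop body, named for the fold; it is A's loop body verbatim.
def pvStepA (ref_dict comparison_dict : List (String × String)) (comparison_protien_set : List String)
    (st : PySem.Dict String (List String) × PySem.Set String) (ref_protein : String) :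
    PySem.Dict String (List String) × PySem.Set String :=
  match (PySem.Dict.mk ref_dict).get? ref_protein with
  | none => st
  | some homolog =>
    match (PySem.Dict.mk comparison_dict).get? homolog with
    | none => st
    | some comp_protein =>
      if comparison_protien_set.contains comp_protein then
        let homologs := PySem.Set.add st.2 comp_protein
        match st.1.get? ref_protein with
        | some lst => (st.1.insert ref_protein (lst ++ [comp_protein]), homologs)
        | none => (st.1.insert ref_protein [comp_protein], homologs)
      else st

def reference_to_comparison_listmap (ref_dict : List (String × String)) (comparison_dict : List (String × String)) (ref_protien_list : List String) (comparison_protien_set : List String) : (List (String × List String)) × List String :=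
  let st := ref_protien_list.foldl (pvStepA ref_dict comparison_dict comparison_protien_set)
    (PySem.Dict.empty, PySem.Set.empty)
  (st.1.items, st.2)

-- ===== PORT B =====
-- B's join-loop body (one iteration over ref_dict.items()).
def pvJoinStep (comparison_dict : List (String × String)) (comparison_protien_set : List String)
    (m : PySem.Dict String String) (p : String × String) : PySem.Dict String String :=
  match (PySem.Dict.mk comparison_dict).get? p.2 with
  | some c => if comparison_protien_set.contains c then m.insert p.1 c else m
  | none => m

-- comp_map: the join of the two dicts, filtered by comparison_protien_set.
def pvJoinMap (ref_dict comparison_dict : List (String × String)) (comparison_protien_set : List String) :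
    PySem.Dict String String :=
  ref_dict.foldl (pvJoinStep comparison_dict comparison_protien_set) PySem.Dict.empty

def reference_to_comparison_listmap_alt (ref_dict : List (String × String)) (comparison_dict : List (String × String)) (ref_protien_list : List String) (comparison_protien_set : List String) : (List (String × List String)) × List String :=
  let comp_map := pvJoinMap ref_dict comparison_dict comparison_protien_set
  let counts := ref_protien_list.foldl (fun d r =>
    if comp_map.contains r then d.insert r (d.getD r 0 + 1) else d)
    (PySem.Dict.empty : PySem.Dict String Int)
  let homolog_dict := counts.items.map (fun p => (p.1,
    match comp_map.get? p.1 with              -- comp_map[r]; the key is always present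
    | some c => PySem.List.pyRepeat [c] p.2   -- [comp_map[r]] * n
    | none => []))
  (homolog_dict, PySem.Set.ofList (counts.keys.filterMap (fun r => comp_map.get? r)))

-- ===== PRECONDITION & SPEC =====
-- Pre_ only excludes ref_dict association lists with duplicate keys, which do not represent any
-- Python dict (the Python argument ref_dict is a dict, so its keys are unique by construction).
def Pre_reference_to_comparison_listmap (ref_dict : List (String × String)) (comparison_dict : List (String × String)) (ref_protien_list : List String) (comparison_protien_set : List String) : Prop :=
  (ref_dict.map Prod.fst).Nodup
instance (ref_dict : List (String × String)) (comparison_dict : List (String × String)) (ref_protien_list : List String) (comparison_protien_set : List String) : Decidable (Pre_reference_to_comparison_listmap ref_dict comparison_dict ref_protien_list comparison_protien_set) := by unfold Pre_reference_to_comparison_listmap; infer_instance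

def pvWitness_reference_to_comparison_listmap : (List (String × String)) × (List (String × String)) × List String × List String :=
  ([("a", "h")], [("h", "c")], ["a", "b", "a"], ["c"])

def Spec_reference_to_comparison_listmap (ref_dict : List (String × String)) (comparison_dict : List (String × String)) (ref_protien_list : List String) (comparison_protien_set : List String) (out : (List (String × List String)) × List String) : Prop := out = reference_to_comparison_listmap_alt ref_dict comparison_dict ref_protien_list comparison_protien_set
instance (ref_dict : List (String × String)) (comparison_dict : List (String × String)) (ref_protien_list : List String) (comparison_protien_set : List String) (out : (List (String × List String)) × List String) : Decidable (Spec_reference_to_comparison_listmap ref_dict comparison_dict ref_protien_list comparison_protien_set out) := by unfold Spec_reference_to_comparison_listmap; infer_instance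

-- ===== CLAIM =====
def Claim_equal_reference_to_comparison_listmap : Prop := ∀ (ref_dict : List (String × String)) (comparison_dict : List (String × String)) (ref_protien_list : List String) (comparison_protien_set : List String), Dom_reference_to_comparison_listmap ref_dict comparison_dict ref_protien_list comparison_protien_set → Pre_reference_to_comparison_listmap ref_dict comparison_dict ref_protien_list comparison_protien_set → Spec_reference_to_comparison_listmap ref_dict comparison_dict ref_protien_list comparison_protien_set (reference_to_comparison_listmap ref_dict comparison_dict ref_protien_list comparison_protien_set)

-- ===== LEMMAS AND PROOFS =====

-- The chained "homolog accepted?" test shared (semantically) by both programs.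
def pvAccept (comparison_dict : List (String × String)) (comparison_protien_set : List String)
    (h : String) : Option String :=
  match (PySem.Dict.mk comparison_dict).get? h with
  | some c => if comparison_protien_set.contains c then some c else none
  | none => none

-- A's full chained lookup for one reference protein.
def pvCompOf (rd cd : List (String × String)) (cs : List String) (r : String) : Option String :=
  match (PySem.Dict.mk rd).get? r with
  | some h => pvAccept cd cs h
  | none => none

-- A's step, split into its two independent components.
def pvStepD (rd cd : List (String × String)) (cs : List String)
    (d : PySem.Dict String (List String)) (r : String) : PySem.Dict String (List String) :=
  match pvCompOf rd cd cs r with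
  | some c => d.insert r (d.getD r [] ++ [c])
  | none => d

def pvStepS (rd cd : List (String × String)) (cs : List String)
    (s : PySem.Set String) (r : String) : PySem.Set String :=
  match pvCompOf rd cd cs r with
  | some c => PySem.Set.add s c
  | none => s

def pvCval (rd cd : List (String × String)) (cs : List String) (r : String) : String :=
  (pvCompOf rd cd cs r).getD ""

-- B's value-list builder, abstracted through pvCompOf.
def pvRep (rd cd : List (String × String)) (cs : List String) (p : String × Int) :
    String × List String :=
  (p.1, match pvCompOf rd cd cs p.1 with
        | some c => PySem.List.pyRepeat [c] p.2
        | none => [])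

def pvMkD (rd cd : List (String × String)) (cs : List String) (k : PySem.Dict String Int) :
    PySem.Dict String (List String) :=
  PySem.Dict.mk (k.items.map (pvRep rd cd cs))

theorem pvStepA_pair (rd cd : List (String × String)) (cs : List String)
    (st : PySem.Dict String (List String) × PySem.Set String) (r : String) :
    pvStepA rd cd cs st r = (pvStepD rd cd cs st.1 r, pvStepS rd cd cs st.2 r) := by
  unfold pvStepA pvStepD pvStepS pvCompOf pvAccept
  cases h1 : (PySem.Dict.mk rd).get? r with
  | none => rfl
  | some h =>
    cases h2 : (PySem.Dict.mk cd).get? h with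
    | none => simp [h2]
    | some c =>
      by_cases hc : c ∈ cs
      · cases hg : st.1.get? r <;> simp [h2, hc, PySem.Dict.getD, hg]
      · simp [h2, hc]

theorem pvJoinStep_eq (cd : List (String × String)) (cs : List String)
    (m : PySem.Dict String String) (p : String × String) :
    pvJoinStep cd cs m p =
      match pvAccept cd cs p.2 with
      | some c => m.insert p.1 c
      | none => m := by
  unfold pvJoinStep pvAccept
  cases h2 : (PySem.Dict.mk cd).get? p.2 with
  | none => rfl
  | some c =>
    by_cases hc : c ∈ cs
    · simp [hc]
    · simp [hc]

theorem pvJoin_get?_aux (cd : List (String × String)) (cs : List String) :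
    ∀ (rd : List (String × String)) (m : PySem.Dict String String) (r : String),
    (rd.map Prod.fst).Nodup →
    (rd.foldl (pvJoinStep cd cs) m).get? r =
      match (PySem.Dict.mk rd).get? r with
      | some h => (match pvAccept cd cs h with
                   | some c => some c
                   | none => m.get? r)
      | none => m.get? r := by
  intro rd
  induction rd with
  | nil => intro m r _; rfl
  | cons p rest ih =>
    intro m r hnd
    simp only [List.map_cons, List.nodup_cons] at hnd
    rw [List.foldl_cons, ih _ r hnd.2, PySem.Dict.get?_mk_cons, pvJoinStep_eq]
    by_cases hpr : p.1 = r
    · have hnone : (PySem.Dict.mk rest).get? r = none := by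
        rw [PySem.Dict.get?_eq_none_iff_not_mem_keys]
        simpa [PySem.Dict.keys, hpr] using hnd.1
      subst hpr
      cases ha : pvAccept cd cs p.2 with
      | none => simp [hnone, ha]
      | some c => simp [hnone, ha, PySem.Dict.get?_insert_self]
    · have hb : (p.1 == r) = false := by simpa [beq_iff_eq] using hpr
      cases ha : pvAccept cd cs p.2 with
      | none =>
        cases (PySem.Dict.mk rest).get? r with
        | none => simp [hb]
        | some h => cases pvAccept cd cs h <;> simp [hb]
      | some c =>
        have hne := PySem.Dict.get?_insert_of_ne m c (fun h : r = p.1 => hpr h.symm)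
        cases (PySem.Dict.mk rest).get? r with
        | none => simp [hb, hne]
        | some h => cases pvAccept cd cs h <;> simp [hb, hne]

theorem pvJoinMap_get? (rd cd : List (String × String)) (cs : List String) (r : String)
    (hnd : (rd.map Prod.fst).Nodup) :
    (pvJoinMap rd cd cs).get? r = pvCompOf rd cd cs r := by
  unfold pvJoinMap pvCompOf
  rw [pvJoin_get?_aux cd cs rd PySem.Dict.empty r hnd]
  cases (PySem.Dict.mk rd).get? r with
  | none => rfl
  | some h => cases hA : pvAccept cd cs h <;> simp [hA, PySem.Dict.get?_empty]

theorem pvJoinMap_contains (rd cd : List (String × String)) (cs : List String) (r : String)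
    (hnd : (rd.map Prod.fst).Nodup) :
    (pvJoinMap rd cd cs).contains r = (pvCompOf rd cd cs r).isSome := by
  rw [PySem.Dict.contains_eq_isSome_get?, pvJoinMap_get? rd cd cs r hnd]

-- A's set accumulator is Set.update with the filterMap of the chained lookup.
theorem pvFoldS (rd cd : List (String × String)) (cs : List String) :
    ∀ (l : List String) (s : PySem.Set String),
    l.foldl (pvStepS rd cd cs) s = PySem.Set.update s (l.filterMap (pvCompOf rd cd cs)) := by
  intro l
  induction l with
  | nil => intro s; rfl
  | cons r rest ih =>
    intro s
    rw [List.foldl_cons, List.filterMap_cons]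
    cases hF : pvCompOf rd cd cs r with
    | none => rw [ih]; simp [pvStepS, hF]
    | some c =>
      have : pvStepS rd cd cs s r = PySem.Set.add s c := by simp [pvStepS, hF]
      rw [this, ih]
      rfl

theorem pvStepD_if (rd cd : List (String × String)) (cs : List String)
    (d : PySem.Dict String (List String)) (r : String) :
    pvStepD rd cd cs d r =
      if (pvCompOf rd cd cs r).isSome then d.insert r (d.getD r [] ++ [pvCval rd cd cs r])
      else d := by
  unfold pvStepD pvCval
  cases hF : pvCompOf rd cd cs r <;> simp

theorem pvFilterMap_eq_map_filter {α β : Type} (F : α → Option β) (dflt : β) :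
    ∀ l : List α, l.filterMap F = (l.filter (fun r => (F r).isSome)).map (fun r => (F r).getD dflt) := by
  intro l
  induction l with
  | nil => rfl
  | cons x rest ih =>
    rw [List.filterMap_cons, List.filter_cons]
    cases hF : F x <;> simp [hF, ih]

theorem pvFilterMap_eq_map_of_isSome {α β : Type} (F : α → Option β) (dflt : β) :
    ∀ l : List α, (∀ r ∈ l, (F r).isSome) →
    l.filterMap F = l.map (fun r => (F r).getD dflt) := by
  intro l
  induction l with
  | nil => intro _; rfl
  | cons x rest ih =>
    intro h
    rw [List.filterMap_cons]
    cases hF : F x with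
    | none => exact absurd (hF ▸ h x (by simp)) (by simp)
    | some c => simp [hF, ih (fun r hr => h r (by simp [hr]))]

-- Dedup before or after a map: same set, in the same first-insertion order.
theorem pvOfList_map_update {α β : Type} [BEq α] [LawfulBEq α] [BEq β] [LawfulBEq β] (f : α → β) :
    ∀ (xs : List α) (s : PySem.Set α),
    PySem.Set.ofList ((PySem.Set.update s xs).map f) =
      PySem.Set.update (PySem.Set.ofList (s.map f)) (xs.map f) := by
  intro xs
  induction xs with
  | nil => intro s; rfl
  | cons x rest ih =>
    intro s
    have hstep : PySem.Set.update s (x :: rest) = PySem.Set.update (PySem.Set.add s x) rest := rfl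
    rw [hstep, ih (PySem.Set.add s x), List.map_cons]
    have hstep2 : PySem.Set.update (PySem.Set.ofList (s.map f)) (f x :: rest.map f)
        = PySem.Set.update (PySem.Set.add (PySem.Set.ofList (s.map f)) (f x)) (rest.map f) := rfl
    rw [hstep2]
    congr 1
    by_cases hx : s.contains x = true
    · have hmem : x ∈ s := by simpa [PySem.Set.contains] using hx
      have : PySem.Set.add s x = s := PySem.Set.add_of_mem hmem
      rw [this]
      have hfmem : f x ∈ PySem.Set.ofList (s.map f) :=
        (PySem.Set.mem_ofList _ _).mpr (List.mem_map.mpr ⟨x, hmem, rfl⟩)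
      rw [PySem.Set.add_of_mem hfmem]
    · have hmem : x ∉ s := by simpa [PySem.Set.contains] using hx
      have : PySem.Set.add s x = s ++ [x] := by
        simp [PySem.Set.add, PySem.Set.contains, hmem]
      rw [this, List.map_append]
      simp only [List.map_cons, List.map_nil]
      have : PySem.Set.ofList (s.map f ++ [f x]) = PySem.Set.add (PySem.Set.ofList (s.map f)) (f x) := by
        simp [PySem.Set.ofList_eq_foldl, List.foldl_append]
      rw [this]

theorem pvMkD_keys (rd cd : List (String × String)) (cs : List String) (k : PySem.Dict String Int) :
    (pvMkD rd cd cs k).keys = k.keys := by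
  simp [pvMkD, PySem.Dict.keys, List.map_map, pvRep, Function.comp]

theorem pvMkD_contains (rd cd : List (String × String)) (cs : List String)
    (k : PySem.Dict String Int) (r : String) :
    (pvMkD rd cd cs k).contains r = k.contains r := by
  rw [PySem.Dict.contains_eq_decide_mem_keys, PySem.Dict.contains_eq_decide_mem_keys, pvMkD_keys]

-- The replicated value list grows by one element per count increment.
theorem pvRep_succ (rd cd : List (String × String)) (cs : List String) (r : String) (n : Int)
    (c : String) (hF : pvCompOf rd cd cs r = some c) (hn : 0 ≤ n) :
    (match pvCompOf rd cd cs r with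
     | some c => PySem.List.pyRepeat [c] (n + 1)
     | none => ([] : List String)) =
    (match pvCompOf rd cd cs r with
     | some c => PySem.List.pyRepeat [c] n
     | none => ([] : List String)) ++ [c] := by
  rw [hF]
  simp only [PySem.List.pyRepeat_singleton]
  have : (n + 1).toNat = n.toNat + 1 := by omega
  rw [this, List.replicate_succ']

-- A's dict accumulator tracks the replicated image of B's count dict.
theorem pvDictSync (rd cd : List (String × String)) (cs : List String) :
    ∀ (la : List String) (k : PySem.Dict String Int),
    k.keys.Nodup → (∀ p ∈ k.items, 0 ≤ p.2) →
    (∀ r ∈ la, (pvCompOf rd cd cs r).isSome) →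
    la.foldl (fun d r => d.insert r (d.getD r [] ++ [pvCval rd cd cs r])) (pvMkD rd cd cs k)
      = pvMkD rd cd cs (la.foldl (fun d r => d.insert r (d.getD r 0 + 1)) k)
    ∧ (la.foldl (fun d r => d.insert r (d.getD r 0 + 1)) k).keys.Nodup
    ∧ (∀ p ∈ (la.foldl (fun d r => d.insert r (d.getD r 0 + 1)) k).items, 0 ≤ p.2) := by
  intro la
  induction la with
  | nil => intro k h1 h2 _; exact ⟨rfl, h1, h2⟩
  | cons r rest ih =>
    intro k h1 h2 h3
    obtain ⟨c, hF⟩ := Option.isSome_iff_exists.mp (h3 r (by simp))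
    have hstep : (pvMkD rd cd cs k).insert r ((pvMkD rd cd cs k).getD r [] ++ [pvCval rd cd cs r])
        = pvMkD rd cd cs (k.insert r (k.getD r 0 + 1)) := by
      by_cases hc : k.contains r = true
      · -- existing key: both sides rewrite the pair at r in place
        obtain ⟨n, hn⟩ := Option.isSome_iff_exists.mp
          ((PySem.Dict.contains_eq_isSome_get? k r) ▸ hc)
        have hmemk : (r, n) ∈ k.items := PySem.Dict.mem_items_of_get?_eq_some k hn
        have hn0 : 0 ≤ n := h2 _ hmemk
        have hgd : k.getD r 0 = n := by rw [PySem.Dict.getD_eq_get?_getD, hn]; rfl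
        have hmemD : (r, (match pvCompOf rd cd cs r with
            | some c => PySem.List.pyRepeat [c] n | none => [])) ∈ (pvMkD rd cd cs k).items := by
          have h := List.mem_map_of_mem (f := pvRep rd cd cs) hmemk
          simpa [pvMkD, pvRep] using h
        have hndD : (pvMkD rd cd cs k).keys.Nodup := by rw [pvMkD_keys]; exact h1
        have hgdD : (pvMkD rd cd cs k).getD r [] = (match pvCompOf rd cd cs r with
            | some c => PySem.List.pyRepeat [c] n | none => []) :=
          PySem.Dict.getD_of_mem_items _ hmemD hndD []
        have hcD : (pvMkD rd cd cs k).contains r = true := by rw [pvMkD_contains]; exact hc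
        apply PySem.Dict.ext
        rw [PySem.Dict.items_insert_of_contains _ _ hcD, hgd]
        have hitems : (k.insert r (n + 1)).items
            = k.items.map (fun p => if p.1 == r then (r, n + 1) else p) :=
          PySem.Dict.items_insert_of_contains _ _ hc
        simp only [pvMkD]
        rw [hitems, List.map_map, List.map_map]
        apply List.map_congr_left
        intro p hp
        by_cases hpr : p.1 = r
        · have hg2 : k.get? p.1 = some p.2 :=
            PySem.Dict.get?_of_mem_items k (by simpa using hp) h1
          rw [hpr] at hg2
          have hpn : p.2 = n := Option.some.inj (hg2.symm.trans hn)
          have hb : (p.1 == r) = true := beq_iff_eq.mpr hpr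
          simp only [Function.comp, hb, if_pos, pvRep]
          simp only [pvMkD] at hgdD
          rw [hgdD, pvRep_succ rd cd cs r n c hF hn0]
          simp [pvCval, hF]
        · have hb : (p.1 == r) = false := by simpa [beq_iff_eq] using hpr
          simp only [Function.comp, pvRep, hb]
          simp
      · -- fresh key: both sides append
        have hcD : (pvMkD rd cd cs k).contains r = false := by rw [pvMkD_contains]; exact eq_false_of_ne_true hc
        have hget : k.get? r = none := by
          have := PySem.Dict.contains_eq_isSome_get? k r
          rw [eq_false_of_ne_true hc] at this
          simpa using this.symm
        have hgd : k.getD r 0 = 0 := by rw [PySem.Dict.getD_eq_get?_getD, hget]; rfl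
        apply PySem.Dict.ext
        rw [PySem.Dict.items_insert_of_not_contains _ _ hcD, hgd]
        have hitems : (k.insert r (0 + 1)).items = k.items ++ [(r, 0 + 1)] :=
          PySem.Dict.items_insert_of_not_contains _ _ (eq_false_of_ne_true hc)
        simp only [pvMkD]
        rw [hitems, List.map_append]
        congr 1
        have hgetD : (pvMkD rd cd cs k).get? r = none := by
          have h := PySem.Dict.contains_eq_isSome_get? (pvMkD rd cd cs k) r
          rw [hcD] at h
          simpa using h.symm
        have hgdD : (pvMkD rd cd cs k).getD r [] = [] := by
          rw [PySem.Dict.getD_eq_get?_getD, hgetD]; rfl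
        simp only [pvMkD] at hgdD
        rw [hgdD]
        simp [pvRep, pvCval, hF, PySem.List.pyRepeat_singleton]
    have h1' : (k.insert r (k.getD r 0 + 1)).keys.Nodup := PySem.Dict.nodup_keys_insert _ _ _ h1
    have h2' : ∀ p ∈ (k.insert r (k.getD r 0 + 1)).items, 0 ≤ p.2 := by
      intro p hp
      rcases (PySem.Dict.mem_items_insert _ _ _ _).mp hp with h | ⟨h, _⟩
      · subst h
        simp only
        have : 0 ≤ k.getD r 0 := by
          rw [PySem.Dict.getD_eq_get?_getD]
          cases hg : k.get? r with
          | none => simp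
          | some n => simpa using h2 _ (PySem.Dict.mem_items_of_get?_eq_some k hg)
        omega
      · exact h2 p h
    obtain ⟨ha, hb', hc'⟩ := ih (k.insert r (k.getD r 0 + 1)) h1' h2'
      (fun r' hr' => h3 r' (by simp [hr']))
    exact ⟨by rw [List.foldl_cons, List.foldl_cons, hstep, ha], by rw [List.foldl_cons]; exact hb',
      by rw [List.foldl_cons]; exact hc'⟩

-- ===== VERDICT =====
theorem reference_to_comparison_listmap_spec : Claim_equal_reference_to_comparison_listmap := by
  intro rd cd rl cs _ hnd
  unfold Spec_reference_to_comparison_listmap reference_to_comparison_listmap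
    reference_to_comparison_listmap_alt
  simp only
  set F := pvCompOf rd cd cs with hFdef
  -- split A's fold into its two components
  have hsplit : rl.foldl (pvStepA rd cd cs) (PySem.Dict.empty, PySem.Set.empty)
      = (rl.foldl (pvStepD rd cd cs) PySem.Dict.empty, rl.foldl (pvStepS rd cd cs) PySem.Set.empty) := by
    have hfun : rl.foldl (pvStepA rd cd cs) (PySem.Dict.empty, PySem.Set.empty)
        = rl.foldl (fun st r => (pvStepD rd cd cs st.1 r, pvStepS rd cd cs st.2 r))
            (PySem.Dict.empty, PySem.Set.empty) :=
      PySem.List.foldl_congr_mem _ _ _ _ (fun st r _ => pvStepA_pair rd cd cs st r)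
    rw [hfun, PySem.List.foldl_prod_mk]
  rw [hsplit]
  -- identify B's comp_map lookups with A's chained lookup
  have hget : ∀ r, (pvJoinMap rd cd cs).get? r = F r := fun r => pvJoinMap_get? rd cd cs r hnd
  have hcon : ∀ r, (pvJoinMap rd cd cs).contains r = (F r).isSome :=
    fun r => pvJoinMap_contains rd cd cs r hnd
  set la := rl.filter (fun r => (F r).isSome) with hla
  have hlamem : ∀ r ∈ la, (F r).isSome := by
    intro r hr
    exact of_decide_eq_true (by simpa using (List.mem_filter.mp hr).2)
  -- B's counts dict is Counter(la)
  have hcounts : rl.foldl (fun d r =>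
        if (pvJoinMap rd cd cs).contains r then d.insert r (d.getD r 0 + 1) else d)
        (PySem.Dict.empty : PySem.Dict String Int)
      = la.foldl (fun d r => d.insert r (d.getD r 0 + 1)) PySem.Dict.empty := by
    have h1 : rl.foldl (fun d r =>
          if (pvJoinMap rd cd cs).contains r then d.insert r (d.getD r 0 + 1) else d)
          (PySem.Dict.empty : PySem.Dict String Int)
        = rl.foldl (fun d r =>
          if (F r).isSome then d.insert r (d.getD r 0 + 1) else d) PySem.Dict.empty :=
      PySem.List.foldl_congr_mem _ _ _ _ (fun d r _ => by rw [hcon r])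
    rw [h1, PySem.List.foldl_if_eq_foldl_filter]
  -- A's dict fold is the filtered fold
  have hAdict : rl.foldl (pvStepD rd cd cs) PySem.Dict.empty
      = la.foldl (fun d r => d.insert r (d.getD r [] ++ [pvCval rd cd cs r])) PySem.Dict.empty := by
    have h1 : rl.foldl (pvStepD rd cd cs) PySem.Dict.empty
        = rl.foldl (fun d r => if (F r).isSome then d.insert r (d.getD r [] ++ [pvCval rd cd cs r]) else d)
            PySem.Dict.empty :=
      PySem.List.foldl_congr_mem _ _ _ _ (fun d r _ => pvStepD_if rd cd cs d r)
    rw [h1, PySem.List.foldl_if_eq_foldl_filter]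
  obtain ⟨hsync, -, -⟩ := pvDictSync rd cd cs la PySem.Dict.empty
    (by simp) (by simp [PySem.Dict.empty]) hlamem
  have hempty : pvMkD rd cd cs PySem.Dict.empty = PySem.Dict.empty := rfl
  rw [hempty] at hsync
  set counts := la.foldl (fun d r => d.insert r (d.getD r 0 + 1)) (PySem.Dict.empty : PySem.Dict String Int)
    with hcountsdef
  -- first component
  have hfst : (rl.foldl (pvStepD rd cd cs) PySem.Dict.empty).items
      = counts.items.map (fun p => (p.1,
          match (pvJoinMap rd cd cs).get? p.1 with
          | some c => PySem.List.pyRepeat [c] p.2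
          | none => [])) := by
    rw [hAdict, hsync]
    simp only [pvMkD]
    apply List.map_congr_left
    intro p _
    simp [pvRep, hget p.1, hFdef]
  -- second component
  have hsnd : rl.foldl (pvStepS rd cd cs) PySem.Set.empty
      = PySem.Set.ofList (counts.keys.filterMap (fun r => (pvJoinMap rd cd cs).get? r)) := by
    rw [pvFoldS]
    have hkeys : counts.keys = PySem.Set.ofList la := by
      rw [hcountsdef, PySem.Dict.foldl_insert_getD_add_one_eq_counter, PySem.Dict.keys_counter]
    have hkmem : ∀ r ∈ counts.keys, (F r).isSome := by
      intro r hr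
      rw [hkeys] at hr
      exact hlamem r ((PySem.Set.mem_ofList _ _).mp hr)
    have hBfm : counts.keys.filterMap (fun r => (pvJoinMap rd cd cs).get? r)
        = counts.keys.map (fun r => (F r).getD "") := by
      rw [List.filterMap_congr (fun r _ => hget r)]
      exact pvFilterMap_eq_map_of_isSome F "" counts.keys hkmem
    rw [hBfm, hkeys]
    have hAfm : rl.filterMap F = la.map (fun r => (F r).getD "") := by
      rw [pvFilterMap_eq_map_filter F "" rl]
    rw [hAfm]
    have := pvOfList_map_update (fun r => (F r).getD "") la (PySem.Set.empty : PySem.Set String)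
    have hupd : PySem.Set.update (PySem.Set.empty : PySem.Set String) la = PySem.Set.ofList la := rfl
    have hupd2 : ∀ ys : List String, PySem.Set.update (PySem.Set.empty : PySem.Set String) ys
        = PySem.Set.ofList ys := fun ys => rfl
    rw [hupd2 (la.map (fun r => (F r).getD ""))]
    rw [hupd] at this
    exact this.symm
  rw [hcounts]
  exact Prod.ext_iff.mpr ⟨hfst, hsnd⟩
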